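-- pv_equiv track=rewrite | github.com/yassine-turki/Polytechnique_Courses | CSE202/TD_3/search.py | cost_binary_search_real
-- ===== SOURCE A (Python) =====
-- def cost_binary_search_real(A,v):
--     if len(A) == 0: return 0
--
--     left = 0
--     right = len(A) - 1
--     cost =  0
--     while (right >= left):
--         cost += 1
--         mid = left + (right - left)//2
--         if (v == A[mid]):
--             return cost + 1
--         elif (v < A[mid]):
--             right = mid - 1
--             cost += 2
--         else:
--             left = mid + 1
--             cost += 2
--
--     return cost
-- ===== SOURCE B (Python) =====
-- def cost_binary_search_real(A, v):
--     # recursive binary search on a (left, size) window counting probes;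
--     # cost is recovered by the closed form 3*p-1 (found) / 3*p (not found)
--     def go(left, size):
--         if size == 0:
--             return (0, False)
--         half = (size - 1) // 2
--         x = A[left + half]
--         if v == x:
--             return (1, True)
--         if v < x:
--             p, f = go(left, half)
--         else:
--             p, f = go(left + half + 1, size - half - 1)
--         return (p + 1, f)
--     p, found = go(0, len(A))
--     return 3 * p - 1 if found else 3 * p
-- ===== Notes on version B (the rewrite author's own statement) =====
-- stated objective: alternative
-- what changed: Replaces the imperative (left,right,cost) while loop by a divide-and-conquer recursion on a (left,size) window that only counts probes plus a found flag, recovering the cost by the closed form 3p-1 (found) / 3p (not found).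
import Mathlib
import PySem

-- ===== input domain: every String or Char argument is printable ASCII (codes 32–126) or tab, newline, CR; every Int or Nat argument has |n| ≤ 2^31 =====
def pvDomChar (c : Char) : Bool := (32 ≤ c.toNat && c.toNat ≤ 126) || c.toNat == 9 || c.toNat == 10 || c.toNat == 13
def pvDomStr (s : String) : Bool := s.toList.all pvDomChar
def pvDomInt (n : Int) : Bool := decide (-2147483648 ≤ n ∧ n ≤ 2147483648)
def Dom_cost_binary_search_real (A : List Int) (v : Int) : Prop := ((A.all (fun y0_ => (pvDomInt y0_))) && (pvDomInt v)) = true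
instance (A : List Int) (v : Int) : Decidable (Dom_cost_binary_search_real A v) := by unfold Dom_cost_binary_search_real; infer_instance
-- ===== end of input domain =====

-- B restructures A's cost-accumulating (left,right) while loop into a divide-and-conquer
-- recursion on a (left,size) window counting probes, cost recovered by a closed form — objective: alternative.


-- ===== PORT A =====
-- the while loop of A as a recursion over (left, right, cost); A[mid] is ported as
-- pyGetD _ _ 0, exact here because mid stays within 0..len-1 on every reachable call
def pvLoopA (A : List Int) (v : Int) (left right cost : Int) : Int :=
  if h : right ≥ left then
    let cost1 := cost + 1
    let mid := left + PySem.Int.floordiv (right - left) 2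
    if v = PySem.List.pyGetD A mid 0 then cost1 + 1
    else if v < PySem.List.pyGetD A mid 0 then pvLoopA A v left (mid - 1) (cost1 + 2)
    else pvLoopA A v (mid + 1) right (cost1 + 2)
  else cost
termination_by (right + 1 - left).toNat
decreasing_by
  all_goals
    simp only [PySem.Int.floordiv_eq_ediv_of_pos (by omega : (0:Int) < 2)]
    omega

def cost_binary_search_real (A : List Int) (v : Int) : Int :=
  if (A.length : Int) = 0 then 0
  else pvLoopA A v 0 ((A.length : Int) - 1) 0

-- ===== PORT B =====
-- B's helper go: recursion on the window (left, size), size a Nat, returning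
-- (number of probes, found flag); A[left+half] is exact here since the probed
-- index stays within 0..len-1 on every reachable call
def pvGo (A : List Int) (v : Int) (left : Int) (size : Nat) : Int × Bool :=
  if size = 0 then (0, false)
  else
    let half := (size - 1) / 2
    let x := PySem.List.pyGetD A (left + (half : Int)) 0
    if v = x then (1, true)
    else
      let r := if v < x then pvGo A v left half
               else pvGo A v (left + (half : Int) + 1) (size - half - 1)
      (r.1 + 1, r.2)
termination_by size
decreasing_by all_goals omega

def cost_binary_search_real_alt (A : List Int) (v : Int) : Int :=
  let r := pvGo A v 0 A.length
  if r.2 then 3 * r.1 - 1 else 3 * r.1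

-- ===== PRECONDITION & SPEC =====
def Spec_cost_binary_search_real (A : List Int) (v : Int) (out : Int) : Prop := out = cost_binary_search_real_alt A v
instance (A : List Int) (v : Int) (out : Int) : Decidable (Spec_cost_binary_search_real A v out) := by unfold Spec_cost_binary_search_real; infer_instance

-- ===== CLAIM (what is proved, stated in full; the proofs are below) =====
def Claim_equal_cost_binary_search_real : Prop := ∀ (A : List Int) (v : Int), Dom_cost_binary_search_real A v → Spec_cost_binary_search_real A v (cost_binary_search_real A v)

-- ===== LEMMAS AND PROOFS =====

-- loop ↔ window-recursion correspondence: on the window left..right of size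
-- (right+1-left).toNat, A's loop returns the incoming cost plus the closed form
-- of B's probe count
theorem pvLoopA_eq_go (A : List Int) (v : Int) :
    ∀ (size : Nat) (left right cost : Int), (right + 1 - left).toNat = size →
      pvLoopA A v left right cost =
        cost + (if (pvGo A v left size).2 then 3 * (pvGo A v left size).1 - 1
                else 3 * (pvGo A v left size).1) := by
  intro size
  induction size using Nat.strong_induction_on with
  | _ size ih =>
    intro left right cost hsz
    rw [pvLoopA, pvGo]
    by_cases h : right ≥ left
    · have hsz0 : size ≠ 0 := by omega
      rw [dif_pos h, if_neg hsz0]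
      have hfd : PySem.Int.floordiv (right - left) 2 = (right - left) / 2 :=
        PySem.Int.floordiv_eq_ediv_of_pos (by omega)
      have hmid : left + (right - left) / 2 = left + (((size - 1) / 2 : Nat) : Int) := by omega
      simp only [hfd, hmid]
      by_cases he : v = PySem.List.pyGetD A (left + (((size - 1) / 2 : Nat) : Int)) 0
      · rw [if_pos he, if_pos he]
        norm_num
        omega
      · rw [if_neg he, if_neg he]
        by_cases hl : v < PySem.List.pyGetD A (left + (((size - 1) / 2 : Nat) : Int)) 0
        · rw [if_pos hl, if_pos hl,
            ih ((size - 1) / 2) (by omega) left (left + (((size - 1) / 2 : Nat) : Int) - 1)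
              (cost + 1 + 2) (by omega)]
          split <;> omega
        · rw [if_neg hl, if_neg hl,
            ih (size - (size - 1) / 2 - 1) (by omega) (left + (((size - 1) / 2 : Nat) : Int) + 1)
              right (cost + 1 + 2) (by omega)]
          split <;> omega
    · rw [dif_neg h, if_pos (by omega : size = 0)]
      norm_num

-- ===== VERDICT (by name: the statement is the Claim_ definition above) =====
theorem cost_binary_search_real_spec : Claim_equal_cost_binary_search_real := by
  intro A v _
  unfold Spec_cost_binary_search_real cost_binary_search_real cost_binary_search_real_alt
  by_cases hA : (A.length : Int) = 0
  · have h0 : A.length = 0 := by omega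
    rw [if_pos hA, h0, pvGo]
    norm_num
  · rw [if_neg hA, pvLoopA_eq_go A v A.length 0 ((A.length : Int) - 1) 0 (by omega)]
    dsimp only
    split <;> omega
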